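-- pv_equiv track=rewrite | github.com/hanms0728/AIRKON | pointcloud/make_pointcloud/img_to_ply_with_global_ply.py | _disk_offsets
-- ===== SOURCE A (Python) =====
-- def _disk_offsets(radius: int):
--     """
--     Return list of (dx, dy) integer offsets inside a filled disk of given radius.
--     radius=1 → only center pixel (no expansion). radius=2 → ~5px, radius=3 → ~13px, etc.
--     """
--     r = int(radius)
--     if r <= 1:
--         return [(0, 0)]
--     off = []
--     r2 = r * r
--     for dy in range(-r, r + 1):
--         for dx in range(-r, r + 1):
--             if dx*dx + dy*dy <= r2:
--                 off.append((dx, dy))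
--     return off
-- ===== SOURCE B (Python) =====
-- import math
--
--
-- def _disk_offsets(radius: int):
--     """
--     Return list of (dx, dy) integer offsets inside a filled disk of given radius.
--     Computes only rows dy = 0..r (half-width = isqrt(r*r - dy*dy)); the lower
--     half is the mirror image of the reversed upper rows, so no per-cell distance
--     test and only r+1 isqrt calls.
--     """
--     r = int(radius)
--     if r <= 1:
--         return [(0, 0)]
--     r2 = r * r
--
--     def row(dy):
--         w = math.isqrt(r2 - dy * dy)
--         return [(i - w, dy) for i in range(2 * w + 1)]
--
--     upper = [row(dy) for dy in range(1, r + 1)]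
--     lower = [(dx, -dy) for rw in reversed(upper) for (dx, dy) in rw]
--     return lower + row(0) + [p for rw in upper for p in rw]
-- ===== Notes on version B (the rewrite author's own statement) =====
-- stated objective: alternative
-- what changed: Instead of testing dx*dx+dy*dy <= r*r for every cell of the (2r+1)x(2r+1) bounding square, B computes only the rows dy=0..r directly from their exact half-width math.isqrt(r*r-dy*dy) and obtains the lower half by mirroring the reversed upper rows, assembling lower ++ row(0) ++ upper.
import Mathlib
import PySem

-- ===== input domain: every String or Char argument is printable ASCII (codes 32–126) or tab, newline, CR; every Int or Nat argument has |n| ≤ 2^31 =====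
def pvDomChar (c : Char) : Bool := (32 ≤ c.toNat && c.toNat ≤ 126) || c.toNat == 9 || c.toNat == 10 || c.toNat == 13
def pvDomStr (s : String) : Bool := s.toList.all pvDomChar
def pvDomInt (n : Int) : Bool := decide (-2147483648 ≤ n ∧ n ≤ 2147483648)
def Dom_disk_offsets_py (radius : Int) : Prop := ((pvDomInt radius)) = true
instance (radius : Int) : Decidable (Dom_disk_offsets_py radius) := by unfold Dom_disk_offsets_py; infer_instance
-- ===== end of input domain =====

-- B computes only the rows dy = 0..r from their isqrt half-width and mirrors the
-- reversed upper rows for the lower half, instead of A's per-cell distance test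
-- over the whole bounding square (objective: alternative algorithm).

-- ===== PORT A =====
def disk_offsets_py (radius : Int) : List (Int × Int) :=
  let r := radius
  if r ≤ 1 then [((0 : Int), (0 : Int))]
  else
    let r2 := r * r
    (PySem.List.pyRange (-r) (r + 1) 1).foldl
      (fun off dy =>
        (PySem.List.pyRange (-r) (r + 1) 1).foldl
          (fun off dx => if dx * dx + dy * dy ≤ r2 then off ++ [(dx, dy)] else off)
          off)
      []

-- ===== PORT B =====
-- math.isqrt on a nonnegative int is ported as Nat.sqrt of the toNat (exact floor sqrt);
-- '[(i - w, dy) for i in range(2*w+1)]' is ported over List.range since 2*w+1 ≥ 0.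
def pvRow (r2 : Int) (dy : Int) : List (Int × Int) :=
  let w : Int := (Nat.sqrt (r2 - dy * dy).toNat : Int)
  (List.range (2 * w + 1).toNat).map (fun (i : Nat) => ((i : Int) - w, dy))

def disk_offsets_py_alt (radius : Int) : List (Int × Int) :=
  let r := radius
  if r ≤ 1 then [((0 : Int), (0 : Int))]
  else
    let r2 := r * r
    let upper := (PySem.List.pyRange 1 (r + 1) 1).map (fun dy => pvRow r2 dy)
    let lower := upper.reverse.flatMap (fun rw => rw.map (fun p => (p.1, -p.2)))
    lower ++ pvRow r2 0 ++ upper.flatMap (fun rw => rw)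

-- ===== PRECONDITION & SPEC =====
def Spec_disk_offsets_py (radius : Int) (out : List (Int × Int)) : Prop := out = disk_offsets_py_alt radius
instance (radius : Int) (out : List (Int × Int)) : Decidable (Spec_disk_offsets_py radius out) := by unfold Spec_disk_offsets_py; infer_instance

-- ===== CLAIM (what is proved, stated in full; the proofs are below) =====
def Claim_equal_disk_offsets_py : Prop := ∀ (radius : Int), Dom_disk_offsets_py radius → Spec_disk_offsets_py radius (disk_offsets_py radius)

-- ===== LEMMAS AND PROOFS =====

-- The canonical row: dx from -w to w at height dy, w = isqrt(r² − dy²).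
def pvRow' (r2 : Int) (dy : Int) : List (Int × Int) :=
  let w : Int := (Nat.sqrt (r2 - dy * dy).toNat : Int)
  (PySem.List.pyRange (-w) (w + 1) 1).map (fun dx => (dx, dy))

-- B's range-of-naturals row is the canonical row.
theorem pvRow_eq_row' (r2 dy : Int) : pvRow r2 dy = pvRow' r2 dy := by
  simp only [pvRow, pvRow']
  rw [PySem.List.pyRange_one, List.map_map]
  have hn : ((Nat.sqrt (r2 - dy * dy).toNat : Int) + 1 - -(Nat.sqrt (r2 - dy * dy).toNat : Int)).toNat
      = (2 * (Nat.sqrt (r2 - dy * dy).toNat : Int) + 1).toNat := by omega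
  rw [hn]
  apply List.map_congr_left
  intro i _
  simp [Function.comp]
  omega

-- The mirrored row: negating the y-coordinate of row dy gives row (−dy).
theorem pvRow'_neg (r2 dy : Int) :
    (pvRow' r2 dy).map (fun p => (p.1, -p.2)) = pvRow' r2 (-dy) := by
  simp only [pvRow']
  simp [List.map_map, Function.comp]

-- Filtering a unit-step range by an interval predicate yields the corresponding subrange.
theorem pv_filter_interval (a b c d : Int) (p : Int → Prop) [DecidablePred p]
    (ha : a ≤ c) (hd : d + 1 ≤ b) (hcd : c ≤ d + 1)
    (hp : ∀ x, p x ↔ c ≤ x ∧ x ≤ d) :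
    (PySem.List.pyRange a b 1).filter (fun x => decide (p x)) = PySem.List.pyRange c (d + 1) 1 := by
  rw [PySem.List.pyRange_one_append a c b ha (by omega),
      PySem.List.pyRange_one_append c (d + 1) b hcd hd, List.filter_append, List.filter_append]
  have h1 : (PySem.List.pyRange a c 1).filter (fun x => decide (p x)) = [] := by
    apply List.filter_eq_nil_iff.2
    intro x hx
    rw [PySem.List.mem_pyRange_one] at hx
    simpa [hp] using (by omega : ¬ (c ≤ x ∧ x ≤ d))
  have h2 : (PySem.List.pyRange c (d + 1) 1).filter (fun x => decide (p x)) = PySem.List.pyRange c (d + 1) 1 := by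
    apply List.filter_eq_self.2
    intro x hx
    rw [PySem.List.mem_pyRange_one] at hx
    simpa [hp] using (by omega : c ≤ x ∧ x ≤ d)
  have h3 : (PySem.List.pyRange (d + 1) b 1).filter (fun x => decide (p x)) = [] := by
    apply List.filter_eq_nil_iff.2
    intro x hx
    rw [PySem.List.mem_pyRange_one] at hx
    simpa [hp] using (by omega : ¬ (c ≤ x ∧ x ≤ d))
  rw [h1, h2, h3]
  simp

-- Membership in the disk row dy is exactly |dx| ≤ isqrt(r² − dy²).
theorem pv_row_pred (r dy dx : Int) (hlo : -r ≤ dy) (hhi : dy ≤ r) :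
    dx * dx + dy * dy ≤ r * r ↔
      -(Nat.sqrt (r * r - dy * dy).toNat : Int) ≤ dx ∧ dx ≤ (Nat.sqrt (r * r - dy * dy).toNat : Int) := by
  have hdy : dy * dy ≤ r * r := by nlinarith
  have hsq : (dx.natAbs * dx.natAbs : Int) = dx * dx := Int.natAbs_mul_self
  have hiff : dx * dx + dy * dy ≤ r * r ↔ dx.natAbs * dx.natAbs ≤ (r * r - dy * dy).toNat := by
    omega
  rw [hiff, ← Nat.le_sqrt]
  omega

-- The row half-width never exceeds the radius.
theorem pv_isqrt_le (radius dy : Int) (h2 : 2 ≤ radius) (_hdy : dy * dy ≤ radius * radius) :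
    (Nat.sqrt (radius * radius - dy * dy).toNat : Int) ≤ radius := by
  have hm : ((radius.toNat : Int)) = radius := Int.toNat_of_nonneg (by omega)
  have hc : ((radius.toNat * radius.toNat : Nat) : Int) = radius * radius := by
    rw [Int.natCast_mul, hm]
  have hnn : 0 ≤ dy * dy := mul_self_nonneg dy
  have hle : (radius * radius - dy * dy).toNat ≤ radius.toNat * radius.toNat := by omega
  have h := Nat.sqrt_le_sqrt hle
  rw [← Nat.pow_two, Nat.sqrt_eq' radius.toNat] at h
  omega

-- A in canonical form: a flatMap of canonical rows over dy = -r..r.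
theorem pvA_canon (radius : Int) (hr : ¬ radius ≤ 1) :
    disk_offsets_py radius =
      (PySem.List.pyRange (-radius) (radius + 1) 1).flatMap (pvRow' (radius * radius)) := by
  unfold disk_offsets_py
  simp only [if_neg hr]
  have hstep : ∀ (acc : List (Int × Int)) (dy : Int),
      dy ∈ PySem.List.pyRange (-radius) (radius + 1) 1 →
      (PySem.List.pyRange (-radius) (radius + 1) 1).foldl
        (fun off dx => if dx * dx + dy * dy ≤ radius * radius then off ++ [(dx, dy)] else off) acc
      = acc ++ pvRow' (radius * radius) dy := by
    intro acc dy hdy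
    rw [PySem.List.mem_pyRange_one] at hdy
    rw [PySem.List.foldl_append_ite (fun dx => dx * dx + dy * dy ≤ radius * radius)
          (fun dx => (dx, dy))]
    congr 1
    unfold pvRow'
    congr 1
    apply pv_filter_interval (-radius) (radius + 1)
          (-(Nat.sqrt (radius * radius - dy * dy).toNat : Int))
          ((Nat.sqrt (radius * radius - dy * dy).toNat : Int))
          (fun dx => dx * dx + dy * dy ≤ radius * radius)
          ?_ ?_ (by omega)
          (fun dx => pv_row_pred radius dy dx hdy.1 (by omega))
    · have := pv_isqrt_le radius dy (by omega) (by nlinarith [hdy.1, hdy.2])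
      omega
    · have := pv_isqrt_le radius dy (by omega) (by nlinarith [hdy.1, hdy.2])
      omega
  calc (PySem.List.pyRange (-radius) (radius + 1) 1).foldl
        (fun off dy =>
          (PySem.List.pyRange (-radius) (radius + 1) 1).foldl
            (fun off dx => if dx * dx + dy * dy ≤ radius * radius then off ++ [(dx, dy)] else off) off)
        []
      = (PySem.List.pyRange (-radius) (radius + 1) 1).foldl
          (fun off dy => off ++ pvRow' (radius * radius) dy) [] := by
        apply PySem.List.foldl_congr_mem
        intro acc dy hdy
        exact hstep acc dy hdy
    _ = [] ++ (PySem.List.pyRange (-radius) (radius + 1) 1).flatMap (pvRow' (radius * radius)) :=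
        PySem.List.foldl_append_eq_flatMap _ _ _
    _ = _ := by simp

-- The reversed, negated range 1..r is the range -r..-1.
theorem pv_rev_neg_range (r : Int) (hr : 1 ≤ r) :
    ((PySem.List.pyRange 1 (r + 1) 1).reverse).map (fun dy => -dy)
      = PySem.List.pyRange (-r) 0 1 := by
  have h1 : PySem.List.pyRange r 0 (-1) = (PySem.List.pyRange 1 (r + 1) 1).reverse :=
    PySem.List.pyRange_neg_one_eq_reverse r 0
  rw [← h1, PySem.List.pyRange_neg_one, PySem.List.pyRange_one, List.map_map]
  have hn : (r - 0).toNat = (0 - -r).toNat := by omega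
  rw [hn]
  apply List.map_congr_left
  intro k _
  simp [Function.comp]
  omega

-- B in the same canonical form.
theorem pvB_canon (radius : Int) (hr : ¬ radius ≤ 1) :
    disk_offsets_py_alt radius =
      (PySem.List.pyRange (-radius) (radius + 1) 1).flatMap (pvRow' (radius * radius)) := by
  unfold disk_offsets_py_alt
  simp only [if_neg hr]
  have hrow : (fun dy => pvRow (radius * radius) dy) = pvRow' (radius * radius) := by
    funext dy; exact pvRow_eq_row' _ _
  have hsplit : PySem.List.pyRange (-radius) (radius + 1) 1
      = PySem.List.pyRange (-radius) 0 1 ++ (PySem.List.pyRange 0 1 1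
        ++ PySem.List.pyRange 1 (radius + 1) 1) := by
    rw [← PySem.List.pyRange_one_append 0 1 (radius + 1) (by omega) (by omega)]
    exact PySem.List.pyRange_one_append (-radius) 0 (radius + 1) (by omega) (by omega)
  have hmid : (PySem.List.pyRange 0 1 1).flatMap (pvRow' (radius * radius))
      = pvRow' (radius * radius) 0 := by
    have h01 : PySem.List.pyRange 0 1 1 = [0] := PySem.List.pyRange_one_singleton 0
    rw [h01]
    simp
  have hup : ((PySem.List.pyRange 1 (radius + 1) 1).map
        (fun dy => pvRow (radius * radius) dy)).flatMap (fun rw => rw)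
      = (PySem.List.pyRange 1 (radius + 1) 1).flatMap (pvRow' (radius * radius)) := by
    rw [hrow, List.flatMap_map]
  have hlow : (((PySem.List.pyRange 1 (radius + 1) 1).map
        (fun dy => pvRow (radius * radius) dy)).reverse).flatMap
        (fun rw => rw.map (fun p => (p.1, -p.2)))
      = (PySem.List.pyRange (-radius) 0 1).flatMap (pvRow' (radius * radius)) := by
    rw [hrow, ← List.map_reverse, List.flatMap_map, ← pv_rev_neg_range radius (by omega),
        List.flatMap_map]
    apply List.flatMap_congr  -- pointwise: mirrored row dy is row (-dy)
    intro dy _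
    exact pvRow'_neg _ _
  rw [hlow, hup, hsplit, List.flatMap_append, List.flatMap_append, hmid, List.append_assoc,
      pvRow_eq_row']

-- ===== VERDICT (by name: the statement is the Claim_ definition above) =====
theorem disk_offsets_py_spec : Claim_equal_disk_offsets_py := by
  intro radius _
  unfold Spec_disk_offsets_py
  by_cases hr : radius ≤ 1
  · unfold disk_offsets_py disk_offsets_py_alt
    simp [hr]
  · rw [pvA_canon radius hr, pvB_canon radius hr]
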